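-- pv_equiv track=rewrite | github.com/K-G-PRAJWAL/Leetcode | Python/2425-Bitwise-XOR-of-All-Pairings.py | xorAllNums_2
-- ===== SOURCE A (Python) =====
-- from typing import List
--
-- def xorAllNums_2(nums1: List[int], nums2: List[int]) -> int:
--     xor1, xor2 = 0, 0
--     len1, len2 = len(nums1), len(nums2)
--
--     if len2%2:
--         for n in nums1:
--             xor1 ^= n
--
--     if len1%2:
--         for n in nums2:
--             xor2 ^= n
--
--     return xor1 ^ xor2
-- ===== SOURCE B (Python) =====
-- from typing import List
--
-- def xorAllNums_2(nums1: List[int], nums2: List[int]) -> int: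
--     result = 0
--     for a in nums1:
--         for b in nums2:
--             result ^= a ^ b
--     return result
-- ===== Notes on version B (the rewrite author's own statement) =====
-- stated objective: alternative
-- what changed: B computes the XOR of all cross-pairings by the direct definition (nested loop over every pair), replacing A's parity-based shortcut that XORs each array only when the other's length is odd.
import Mathlib
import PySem

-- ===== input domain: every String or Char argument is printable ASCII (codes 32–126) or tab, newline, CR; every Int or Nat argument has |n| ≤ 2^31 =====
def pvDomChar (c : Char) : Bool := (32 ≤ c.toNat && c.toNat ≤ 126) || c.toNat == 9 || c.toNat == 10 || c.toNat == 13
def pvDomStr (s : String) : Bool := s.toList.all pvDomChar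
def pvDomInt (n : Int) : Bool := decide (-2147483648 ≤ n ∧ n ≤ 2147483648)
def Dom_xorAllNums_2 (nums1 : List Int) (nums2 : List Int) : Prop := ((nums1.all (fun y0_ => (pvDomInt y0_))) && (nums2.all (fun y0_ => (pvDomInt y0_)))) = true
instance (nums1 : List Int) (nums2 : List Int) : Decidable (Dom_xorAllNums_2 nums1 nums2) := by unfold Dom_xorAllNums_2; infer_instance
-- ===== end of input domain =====

-- B replaces A's parity-based shortcut by the direct definition: XOR of (a ^ b) over every
-- cross-pairing, via a nested loop (alternative decomposition; not faster).

-- ===== PORT A =====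
def xorAllNums_2 (nums1 : List Int) (nums2 : List Int) : Int :=
  let xor1 : Int := 0
  let xor2 : Int := 0
  let len1 := nums1.length
  let len2 := nums2.length
  let xor1 := if len2 % 2 ≠ 0 then nums1.foldl (fun x n => PySem.Int.bxor x n) xor1 else xor1
  let xor2 := if len1 % 2 ≠ 0 then nums2.foldl (fun x n => PySem.Int.bxor x n) xor2 else xor2
  PySem.Int.bxor xor1 xor2

-- ===== PORT B =====
def xorAllNums_2_alt (nums1 : List Int) (nums2 : List Int) : Int :=
  nums1.foldl (fun result a =>
    nums2.foldl (fun result b => PySem.Int.bxor result (PySem.Int.bxor a b)) result) 0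

-- ===== PRECONDITION & SPEC =====
def Spec_xorAllNums_2 (nums1 : List Int) (nums2 : List Int) (out : Int) : Prop := out = xorAllNums_2_alt nums1 nums2
instance (nums1 : List Int) (nums2 : List Int) (out : Int) : Decidable (Spec_xorAllNums_2 nums1 nums2 out) := by unfold Spec_xorAllNums_2; infer_instance

-- ===== CLAIM (what is proved, stated in full; the proofs are below) =====
def Claim_equal_xorAllNums_2 : Prop := ∀ (nums1 : List Int) (nums2 : List Int), Dom_xorAllNums_2 nums1 nums2 → Spec_xorAllNums_2 nums1 nums2 (xorAllNums_2 nums1 nums2)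

-- ===== LEMMAS AND PROOFS =====

-- sign-magnitude-style encoding used to transfer Nat.xor facts to PySem.Int.bxor
def pvDecode (n : Nat) (s : Bool) : Int := if s then -(n : Int) - 1 else (n : Int)

theorem pvDecode_surj (x : Int) : ∃ n s, x = pvDecode n s := by
  by_cases h : 0 ≤ x
  · exact ⟨x.toNat, false, by simp [pvDecode]; omega⟩
  · exact ⟨(-x - 1).toNat, true, by simp [pvDecode]; omega⟩

theorem bxor_decode (n m : Nat) (s t : Bool) :
    PySem.Int.bxor (pvDecode n s) (pvDecode m t) = pvDecode (n ^^^ m) (s.xor t) := by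
  cases s <;> cases t <;> simp [pvDecode, PySem.Int.bxor] <;> omega

theorem bxor_assoc (a b c : Int) :
    PySem.Int.bxor (PySem.Int.bxor a b) c = PySem.Int.bxor a (PySem.Int.bxor b c) := by
  obtain ⟨n, s, rfl⟩ := pvDecode_surj a
  obtain ⟨m, t, rfl⟩ := pvDecode_surj b
  obtain ⟨k, u, rfl⟩ := pvDecode_surj c
  simp [bxor_decode, Nat.xor_assoc]

theorem bxor_left_comm (a b c : Int) :
    PySem.Int.bxor a (PySem.Int.bxor b c) = PySem.Int.bxor b (PySem.Int.bxor a c) := by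
  rw [← bxor_assoc, PySem.Int.bxor_comm a b, bxor_assoc]

theorem zero_bxor (a : Int) : PySem.Int.bxor 0 a = a := by
  rw [PySem.Int.bxor_comm]; exact PySem.Int.bxor_zero a

theorem bxor_self_left (a b : Int) :
    PySem.Int.bxor a (PySem.Int.bxor a b) = b := by
  rw [← bxor_assoc, PySem.Int.bxor_self, zero_bxor]

-- total XOR of a list, A-style
def pvXorAll (l : List Int) : Int := l.foldl (fun x n => PySem.Int.bxor x n) 0

theorem foldl_bxor_shift (l : List Int) (acc : Int) :
    l.foldl (fun x n => PySem.Int.bxor x n) acc = PySem.Int.bxor acc (pvXorAll l) := by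
  induction l generalizing acc with
  | nil => simp [pvXorAll, PySem.Int.bxor_zero]
  | cons b t ih =>
    simp only [pvXorAll, List.foldl_cons]
    rw [ih (PySem.Int.bxor acc b), ih (PySem.Int.bxor 0 b)]
    rw [zero_bxor, bxor_assoc]


theorem pvXorAll_cons (b : Int) (t : List Int) :
    pvXorAll (b :: t) = PySem.Int.bxor b (pvXorAll t) := by
  have h0 : pvXorAll (b :: t)
      = List.foldl (fun x n => PySem.Int.bxor x n) (PySem.Int.bxor 0 b) t := rfl
  rw [h0, foldl_bxor_shift, zero_bxor]

-- the inner loop of B: XORs `a` in len(l) times and XORs in all of l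
theorem inner_loop (l : List Int) (a acc : Int) :
    l.foldl (fun r b => PySem.Int.bxor r (PySem.Int.bxor a b)) acc =
      PySem.Int.bxor acc
        (PySem.Int.bxor (if l.length % 2 = 1 then a else 0) (pvXorAll l)) := by
  induction l generalizing acc with
  | nil => simp [pvXorAll, PySem.Int.bxor_zero, zero_bxor]
  | cons b t ih =>
    simp only [List.foldl_cons, List.length_cons]
    rw [ih]
    rw [pvXorAll_cons]
    rcases Nat.even_or_odd t.length with h | h
    · have h1 : t.length % 2 = 0 := Nat.even_iff.mp h
      have h2 : (t.length + 1) % 2 = 1 := by omega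
      simp only [h1, h2, if_pos rfl]
      simp [pvXorAll, bxor_assoc, PySem.Int.bxor_comm, bxor_left_comm, PySem.Int.bxor_self, bxor_self_left, PySem.Int.bxor_zero, zero_bxor]
    · have h1 : t.length % 2 = 1 := Nat.odd_iff.mp h
      have h2 : (t.length + 1) % 2 = 0 := by omega
      simp only [h1, h2]
      simp [pvXorAll, bxor_assoc, PySem.Int.bxor_comm, bxor_left_comm, PySem.Int.bxor_self, bxor_self_left, PySem.Int.bxor_zero, zero_bxor]

-- the outer loop of B
theorem outer_loop (l1 l2 : List Int) (acc : Int) :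
    l1.foldl (fun r a => l2.foldl (fun r b => PySem.Int.bxor r (PySem.Int.bxor a b)) r) acc =
      PySem.Int.bxor acc
        (PySem.Int.bxor (if l2.length % 2 = 1 then pvXorAll l1 else 0)
          (if l1.length % 2 = 1 then pvXorAll l2 else 0)) := by
  induction l1 generalizing acc with
  | nil => simp [pvXorAll, PySem.Int.bxor_zero, zero_bxor]
  | cons a t ih =>
    simp only [List.foldl_cons, List.length_cons]
    rw [inner_loop, ih]
    rw [pvXorAll_cons]
    rcases Nat.even_or_odd t.length with h | h
    · have h1 : t.length % 2 = 0 := Nat.even_iff.mp h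
      have h2 : (t.length + 1) % 2 = 1 := by omega
      simp only [h1, h2]
      rcases Nat.even_or_odd l2.length with g | g
      · have g1 : l2.length % 2 = 0 := Nat.even_iff.mp g
        simp [g1, bxor_assoc, PySem.Int.bxor_comm, bxor_left_comm, PySem.Int.bxor_self, bxor_self_left, PySem.Int.bxor_zero, zero_bxor, pvXorAll]
      · have g1 : l2.length % 2 = 1 := Nat.odd_iff.mp g
        simp [g1, bxor_assoc, PySem.Int.bxor_comm, bxor_left_comm, PySem.Int.bxor_self, bxor_self_left, PySem.Int.bxor_zero, zero_bxor, pvXorAll]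
    · have h1 : t.length % 2 = 1 := Nat.odd_iff.mp h
      have h2 : (t.length + 1) % 2 = 0 := by omega
      simp only [h1, h2]
      rcases Nat.even_or_odd l2.length with g | g
      · have g1 : l2.length % 2 = 0 := Nat.even_iff.mp g
        simp [g1, bxor_assoc, PySem.Int.bxor_comm, bxor_left_comm, PySem.Int.bxor_self, bxor_self_left, PySem.Int.bxor_zero, zero_bxor, pvXorAll]
      · have g1 : l2.length % 2 = 1 := Nat.odd_iff.mp g
        simp [g1, bxor_assoc, PySem.Int.bxor_comm, bxor_left_comm, PySem.Int.bxor_self, bxor_self_left, PySem.Int.bxor_zero, zero_bxor, pvXorAll]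

-- ===== VERDICT (by name: the statement is the Claim_ definition above) =====
theorem xorAllNums_2_spec : Claim_equal_xorAllNums_2 := by
  intro nums1 nums2 _
  show xorAllNums_2 nums1 nums2 = xorAllNums_2_alt nums1 nums2
  unfold xorAllNums_2 xorAllNums_2_alt
  rw [outer_loop]
  rw [zero_bxor]
  rcases Nat.mod_two_eq_zero_or_one nums1.length with h1 | h1 <;>
  rcases Nat.mod_two_eq_zero_or_one nums2.length with h2 | h2 <;>
    simp [pvXorAll, h1, h2]
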